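-- pv_equiv track=rewrite | github.com/Phoneria/Phoneria-SomeLeetCodeProblems | H730.py | number_of_palindrome
-- ===== SOURCE A (Python) =====
-- def number_of_palindrome(s):
--     def subsets(nums):
--         n = len(nums)
--         output = [[]]
--
--         for num in nums:
--             output += [curr + [num] for curr in output]
--
--         return output
--
--
--     def is_palindrome (s):
--         is_p=True
--         for i in range(len(s)):
--
--             if s[i]!=s[-i-1]:
--                 is_p = False
--         return is_p
--
--     all_p = []
--
--     for i in subsets(s):
--         if is_palindrome(i):
--             if not i in all_p:
--                 all_p.append(i)
--
--     return(len(all_p)-1)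
-- ===== SOURCE B (Python) =====
-- def number_of_palindrome(s):
--     def is_pal(t):
--         i, j = 0, len(t) - 1
--         while i < j:
--             if t[i] != t[j]:
--                 return False
--             i += 1
--             j -= 1
--         return True
--
--     def subseqs(t):
--         # set of all (distinct) subsequences of t, built recursively
--         if not t:
--             return {""}
--         tail = subseqs(t[1:])
--         return tail | {t[0] + x for x in tail}
--
--     return sum(1 for x in subseqs(s) if x and is_pal(x))
-- ===== Notes on version B (the rewrite author's own statement) =====
-- stated objective: faster
-- what changed: A builds the full 2^n subsequence list by iterative doubling, then dedups palindromes with a linear list-membership scan and returns len-1; B generates the set of distinct subsequences recursively with hash-set dedup and directly counts the non-empty palindromic ones with a two-pointer check.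
import Mathlib
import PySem

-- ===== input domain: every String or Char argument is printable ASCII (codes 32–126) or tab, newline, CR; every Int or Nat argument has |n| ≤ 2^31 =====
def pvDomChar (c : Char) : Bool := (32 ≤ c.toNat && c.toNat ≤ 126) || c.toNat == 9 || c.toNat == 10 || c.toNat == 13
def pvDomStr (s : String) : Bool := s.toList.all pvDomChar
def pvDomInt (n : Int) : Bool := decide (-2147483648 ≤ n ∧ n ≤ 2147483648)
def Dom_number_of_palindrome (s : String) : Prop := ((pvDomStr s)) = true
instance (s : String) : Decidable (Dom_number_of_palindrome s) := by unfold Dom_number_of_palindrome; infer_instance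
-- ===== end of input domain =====

-- B replaces A's subset-doubling list with a linear dedup scan by a recursive
-- subsequence-set construction with hash-set dedup and a direct count (objective: faster).

-- ===== PORT A =====
-- A's `subsets`: output = [[]]; for num in nums: output += [curr + [num] for curr in output]
def pvSubsetsA (nums : List Char) : List (List Char) :=
  nums.foldl (fun output num => output ++ output.map (fun curr => curr ++ [num])) [[]]

-- A's `is_palindrome`: for i in range(len(s)): if s[i] != s[-i-1]: is_p = False
def pvIsPalindromeA (l : List Char) : Bool :=
  (PySem.List.pyRange 0 (l.length : Int) 1).foldl
    (fun is_p i =>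
      if PySem.List.pyGet? l i ≠ PySem.List.pyGet? l (-i - 1) then false else is_p)
    true

def number_of_palindrome (s : String) : Int :=
  let all_p : List (List Char) :=
    (pvSubsetsA s.toList).foldl
      (fun all_p i =>
        if pvIsPalindromeA i then
          if i ∈ all_p then all_p else all_p ++ [i]
        else all_p) []
  (all_p.length : Int) - 1

-- ===== PORT B =====
-- B-side strings are modeled by their character lists (exact: "" ↔ [], t[0] + x ↔ cons, t[1:] ↔ tail).
-- B's `is_pal`: two-pointer while-loop
def pvPalLoopB (t : List Char) (i j : Int) : Bool :=
  if i < j then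
    if PySem.List.pyGet? t i ≠ PySem.List.pyGet? t j then false
    else pvPalLoopB t (i + 1) (j - 1)
  else true
termination_by (j - i).toNat
decreasing_by omega

def pvIsPalB (t : List Char) : Bool := pvPalLoopB t 0 ((t.length : Int) - 1)

-- B's `subseqs`: if not t: return {""}; tail = subseqs(t[1:]); return tail | {t[0] + x for x in tail}
def pvSubseqsB : List Char → PySem.Set (List Char)
  | [] => PySem.Set.ofList [[]]
  | c :: t =>
      let tail := pvSubseqsB t
      PySem.Set.union tail (tail.map (fun x => c :: x))

-- B's `sum(1 for x in subseqs(s) if x and is_pal(x))` — an order-independent count over the set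
def number_of_palindrome_alt (s : String) : Int :=
  ((pvSubseqsB s.toList).countP (fun x => !x.isEmpty && pvIsPalB x) : Int)

-- ===== PRECONDITION & SPEC =====
def Spec_number_of_palindrome (s : String) (out : Int) : Prop := out = number_of_palindrome_alt s
instance (s : String) (out : Int) : Decidable (Spec_number_of_palindrome s out) := by unfold Spec_number_of_palindrome; infer_instance

-- ===== CLAIM (what is proved, stated in full; the proofs are below) =====
def Claim_equal_number_of_palindrome : Prop := ∀ (s : String), Dom_number_of_palindrome s → Spec_number_of_palindrome s (number_of_palindrome s)

-- ===== LEMMAS AND PROOFS =====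

-- the common palindrome condition
def pvPalC (t : List Char) : Prop :=
  ∀ k, k < t.length → t.getD k ' ' = t.getD (t.length - 1 - k) ' '

-- A's fold of "if bad then false else acc" is "no bad element"
theorem pv_foldl_false {p : Int → Prop} [DecidablePred p] (L : List Int) (b : Bool) :
    L.foldl (fun acc i => if p i then false else acc) b
      = (b && decide (∀ i ∈ L, ¬ p i)) := by
  induction L generalizing b with
  | nil => simp
  | cons a L ih =>
    simp only [List.foldl_cons, ih]
    by_cases h : p a <;> simp [h]

theorem pvIsPalindromeA_iff (t : List Char) : pvIsPalindromeA t = true ↔ pvPalC t := by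
  unfold pvIsPalindromeA
  rw [pv_foldl_false]
  simp only [Bool.true_and, decide_eq_true_iff]
  constructor
  · intro h k hk
    have := h (k : Int) (by rw [PySem.List.mem_pyRange_one]; omega)
    rw [not_not] at this
    have h1 : PySem.List.pyGet? t (k : Int) = some (t.getD k ' ') := by
      rw [PySem.List.pyGet?_natCast, List.getElem?_eq_getElem hk]
      simp [List.getD, List.getElem?_eq_getElem hk]
    have h2 : -(k : Int) - 1 = -((k + 1 : Nat) : Int) := by push_cast; ring
    have h3 : PySem.List.pyGet? t (-(k : Int) - 1) = some (t.getD (t.length - 1 - k) ' ') := by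
      rw [h2, PySem.List.pyGet?_neg_natCast t (k + 1) (by omega) (by omega)]
      have hk2 : t.length - (k + 1) < t.length := by omega
      rw [List.getElem?_eq_getElem hk2]
      have : t.length - (k + 1) = t.length - 1 - k := by omega
      simp [List.getD, this, List.getElem?_eq_getElem (by omega : t.length - 1 - k < t.length)]
    rw [h1, h3] at this
    exact Option.some_injective _ this
  · intro h i hi
    rw [PySem.List.mem_pyRange_one] at hi
    rw [not_not]
    obtain ⟨k, rfl⟩ : ∃ k : Nat, i = (k : Int) := ⟨i.toNat, by omega⟩
    have hk : k < t.length := by exact_mod_cast hi.2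
    have h1 : PySem.List.pyGet? t (k : Int) = some (t.getD k ' ') := by
      rw [PySem.List.pyGet?_natCast, List.getElem?_eq_getElem hk]
      simp [List.getD, List.getElem?_eq_getElem hk]
    have h2 : -(k : Int) - 1 = -((k + 1 : Nat) : Int) := by push_cast; ring
    have h3 : PySem.List.pyGet? t (-(k : Int) - 1) = some (t.getD (t.length - 1 - k) ' ') := by
      rw [h2, PySem.List.pyGet?_neg_natCast t (k + 1) (by omega) (by omega)]
      have hk2 : t.length - (k + 1) < t.length := by omega
      rw [List.getElem?_eq_getElem hk2]
      have : t.length - (k + 1) = t.length - 1 - k := by omega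
      simp [List.getD, this, List.getElem?_eq_getElem (by omega : t.length - 1 - k < t.length)]
    rw [h1, h3, h k hk]

-- B's two-pointer loop checks exactly the pairs (a, b) with a + b = i + j, i ≤ a < b
theorem pvPalLoopB_iff (t : List Char) (i j : Int) :
    pvPalLoopB t i j = true ↔
      ∀ a b : Int, i ≤ a → a + b = i + j → a < b →
        PySem.List.pyGet? t a = PySem.List.pyGet? t b := by
  fun_induction pvPalLoopB t i j with
  | case1 i j hij hne =>
    simp only [Bool.false_eq_true, false_iff, not_forall]
    exact ⟨i, j, le_refl i, rfl, hij, fun h => hne h⟩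
  | case2 i j hij hne ih =>
    rw [not_not] at hne
    rw [ih]
    constructor
    · intro h a b ha hab hlt
      rcases eq_or_lt_of_le ha with rfl | ha'
      · have : b = j := by omega
        subst this; exact hne
      · exact h a b (by omega) (by omega) hlt
    · intro h a b ha hab hlt
      exact h a b (by omega) (by omega) hlt
  | case3 i j hij =>
    simp only [true_iff]
    intro a b ha hab hlt; omega

theorem pvIsPalB_iff (t : List Char) : pvIsPalB t = true ↔ pvPalC t := by
  unfold pvIsPalB
  rw [pvPalLoopB_iff]
  have hget : ∀ k : Nat, k < t.length →
      PySem.List.pyGet? t (k : Int) = some (t.getD k ' ') := by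
    intro k hk
    rw [PySem.List.pyGet?_natCast, List.getElem?_eq_getElem hk]
    simp [List.getD, List.getElem?_eq_getElem hk]
  constructor
  · intro h k hk
    rcases lt_trichotomy k (t.length - 1 - k) with hlt | heq | hgt
    · have := h (k : Int) ((t.length : Int) - 1 - k) (by omega) (by ring) (by omega)
      rw [hget k hk] at this
      have hk2 : t.length - 1 - k < t.length := by omega
      have hcast : (t.length : Int) - 1 - (k : Int) = ((t.length - 1 - k : Nat) : Int) := by omega
      rw [hcast, hget _ hk2] at this
      exact Option.some_injective _ this
    · rw [← heq]
    · -- use the symmetric pair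
      set m := t.length - 1 - k with hm
      have hmk : t.length - 1 - m = k := by omega
      have hmlt : m < t.length := by omega
      have := h (m : Int) ((t.length : Int) - 1 - m) (by omega) (by ring) (by omega)
      rw [hget m hmlt] at this
      have hcast : (t.length : Int) - 1 - (m : Int) = ((t.length - 1 - m : Nat) : Int) := by omega
      rw [hcast, hget _ (by omega)] at this
      rw [hmk] at this
      exact (Option.some_injective _ this).symm
  · intro h a b ha hab hlt
    obtain ⟨k, rfl⟩ : ∃ k : Nat, a = (k : Int) := ⟨a.toNat, by omega⟩
    have hk : k < t.length := by omega
    have hb : b = ((t.length - 1 - k : Nat) : Int) := by omega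
    rw [hb, hget k hk, hget _ (by omega)]
    exact congrArg some (h k hk)

theorem pvPal_eq (t : List Char) : pvIsPalindromeA t = pvIsPalB t := by
  rw [Bool.eq_iff_iff, pvIsPalindromeA_iff, pvIsPalB_iff]

-- membership in A's subsets list
theorem pvSubsetsA_foldl_mem (l : List Char) (acc : List (List Char)) (x : List Char) :
    x ∈ l.foldl (fun output num => output ++ output.map (fun curr => curr ++ [num])) acc ↔
      ∃ y ∈ acc, ∃ z, z.Sublist l ∧ x = y ++ z := by
  induction l generalizing acc with
  | nil => simp [List.sublist_nil]
  | cons c l ih =>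
    simp only [List.foldl_cons, ih]
    constructor
    · rintro ⟨y, hy, z, hz, rfl⟩
      rcases List.mem_append.1 hy with hy' | hy'
      · exact ⟨y, hy', z, hz.cons c, rfl⟩
      · rcases List.mem_map.1 hy' with ⟨y0, hy0, rfl⟩
        refine ⟨y0, hy0, c :: z, ?_, by simp⟩
        exact (List.sublist_cons_iff).2 (Or.inr ⟨z, rfl, hz⟩)
    · rintro ⟨y, hy, z, hz, rfl⟩
      rcases (List.sublist_cons_iff).1 hz with hz' | ⟨r, rfl, hr⟩
      · exact ⟨y, List.mem_append.2 (Or.inl hy), z, hz', rfl⟩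
      · exact ⟨y ++ [c], List.mem_append.2 (Or.inr (List.mem_map.2 ⟨y, hy, rfl⟩)),
          r, hr, by simp⟩

theorem mem_pvSubsetsA (l : List Char) (x : List Char) :
    x ∈ pvSubsetsA l ↔ x.Sublist l := by
  unfold pvSubsetsA
  rw [pvSubsetsA_foldl_mem]
  constructor
  · rintro ⟨y, hy, z, hz, rfl⟩
    simp only [List.mem_singleton] at hy
    subst hy; simpa using hz
  · intro h; exact ⟨[], by simp, x, h, rfl⟩

-- membership in B's subsequence set
theorem mem_pvSubseqsB (l : List Char) (x : List Char) :
    x ∈ pvSubseqsB l ↔ x.Sublist l := by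
  induction l generalizing x with
  | nil => simp [pvSubseqsB, PySem.Set.mem_ofList, List.sublist_nil]
  | cons c l ih =>
    simp only [pvSubseqsB, PySem.Set.mem_union, List.mem_map, List.sublist_cons_iff]
    constructor
    · rintro (h | ⟨y, hy, rfl⟩)
      · exact Or.inl ((ih x).1 h)
      · exact Or.inr ⟨y, rfl, (ih y).1 hy⟩
    · rintro (h | ⟨r, rfl, hr⟩)
      · exact Or.inl ((ih x).2 h)
      · exact Or.inr ⟨r, (ih r).2 hr, rfl⟩

theorem nodup_pvSubseqsB (l : List Char) : (pvSubseqsB l).Nodup := by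
  induction l with
  | nil => exact PySem.Set.nodup_ofList _
  | cons c l ih => exact PySem.Set.nodup_union _ _ ih

-- A's dedup-append fold: nodup and membership
theorem pvAllP_foldl_nodup (L : List (List Char)) (acc : List (List Char)) (h : acc.Nodup) :
    (L.foldl (fun all_p i =>
        if pvIsPalindromeA i then
          if i ∈ all_p then all_p else all_p ++ [i]
        else all_p) acc).Nodup := by
  induction L generalizing acc with
  | nil => exact h
  | cons a L ih =>
    simp only [List.foldl_cons]
    apply ih
    by_cases h1 : pvIsPalindromeA a
    · by_cases h2 : a ∈ acc
      · simpa [h1, h2] using h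
      · simp only [h1, if_true, h2, if_false]
        exact List.Nodup.append h (by simp) (List.disjoint_singleton.2 h2)
    · simpa [h1] using h

theorem pvAllP_foldl_mem (L : List (List Char)) (acc : List (List Char)) (x : List Char) :
    x ∈ L.foldl (fun all_p i =>
        if pvIsPalindromeA i then
          if i ∈ all_p then all_p else all_p ++ [i]
        else all_p) acc ↔ x ∈ acc ∨ (x ∈ L ∧ pvIsPalindromeA x = true) := by
  induction L generalizing acc with
  | nil => simp
  | cons a L ih =>
    simp only [List.foldl_cons, ih, List.mem_cons]
    by_cases h1 : pvIsPalindromeA a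
    · by_cases h2 : a ∈ acc
      · simp only [h1, if_true, h2, if_true]
        constructor
        · rintro (h | h)
          · exact Or.inl h
          · exact Or.inr ⟨Or.inr h.1, h.2⟩
        · rintro (h | ⟨rfl | hm, hp⟩)
          · exact Or.inl h
          · exact Or.inl h2
          · exact Or.inr ⟨hm, hp⟩
      · simp only [h1, if_true, h2, if_false, List.mem_append, List.mem_singleton]
        constructor
        · rintro ((h | rfl) | h)
          · exact Or.inl h
          · exact Or.inr ⟨Or.inl rfl, h1⟩
          · exact Or.inr ⟨Or.inr h.1, h.2⟩
        · rintro (h | ⟨rfl | hm, hp⟩)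
          · exact Or.inl (Or.inl h)
          · exact Or.inl (Or.inr rfl)
          · exact Or.inr ⟨hm, hp⟩
    · simp only [h1]
      constructor
      · rintro (h | h)
        · exact Or.inl h
        · exact Or.inr ⟨Or.inr h.1, h.2⟩
      · rintro (h | ⟨rfl | hm, hp⟩)
        · exact Or.inl h
        · exact absurd hp (by simpa using h1)
        · exact Or.inr ⟨hm, hp⟩

theorem pvPalA_nil : pvIsPalindromeA [] = true := by decide

-- ===== VERDICT (by name: the statement is the Claim_ definition above) =====
theorem number_of_palindrome_spec : Claim_equal_number_of_palindrome := by
  intro s _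
  unfold Spec_number_of_palindrome number_of_palindrome number_of_palindrome_alt
  set chars := s.toList with hchars
  set all_p := (pvSubsetsA chars).foldl
      (fun all_p i =>
        if pvIsPalindromeA i then
          if i ∈ all_p then all_p else all_p ++ [i]
        else all_p) [] with hallp
  set p : List Char → Bool := fun x => !x.isEmpty && pvIsPalB x with hp
  have hA_nodup : all_p.Nodup := pvAllP_foldl_nodup _ _ (by simp)
  have hA_mem : ∀ x, x ∈ all_p ↔ x.Sublist chars ∧ pvIsPalindromeA x = true := by
    intro x
    rw [hallp, pvAllP_foldl_mem]
    simp [mem_pvSubsetsA]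
  -- B's count as a filtered-list length
  have hB : (pvSubseqsB chars).countP p = ((pvSubseqsB chars).filter p).length :=
    List.countP_eq_length_filter
  have hB_nodup : ((pvSubseqsB chars).filter p).Nodup := (nodup_pvSubseqsB chars).filter p
  have hB_mem : ∀ x, x ∈ (pvSubseqsB chars).filter p ↔
      x.Sublist chars ∧ (x ≠ [] ∧ pvIsPalB x = true) := by
    intro x
    rw [List.mem_filter, mem_pvSubseqsB, hp]
    simp
  -- compare via Finsets
  have hFA : all_p.toFinset = insert ([] : List Char) ((pvSubseqsB chars).filter p).toFinset := by
    apply Finset.ext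
    intro x
    simp only [List.mem_toFinset, Finset.mem_insert, hA_mem, hB_mem]
    constructor
    · rintro ⟨hsub, hpal⟩
      by_cases hx : x = []
      · exact Or.inl hx
      · exact Or.inr ⟨hsub, hx, by rw [← pvPal_eq]; exact hpal⟩
    · rintro (rfl | ⟨hsub, _, hpal⟩)
      · exact ⟨List.nil_sublist chars, pvPalA_nil⟩
      · exact ⟨hsub, by rw [pvPal_eq]; exact hpal⟩
  have hnot : ([] : List Char) ∉ ((pvSubseqsB chars).filter p).toFinset := by
    simp only [List.mem_toFinset, hB_mem]
    rintro ⟨_, h, _⟩; exact h rfl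
  have hcard : all_p.length = ((pvSubseqsB chars).filter p).length + 1 := by
    rw [← List.toFinset_card_of_nodup hA_nodup, ← List.toFinset_card_of_nodup hB_nodup,
      hFA, Finset.card_insert_of_notMem hnot]
  rw [hB]
  show (all_p.length : Int) - 1 = ((List.filter p (pvSubseqsB chars)).length : Int)
  rw [hcard]
  push_cast
  ring
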